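-- pv_equiv track=rewrite | github.com/NhuTungMq/Big-Data | task2_2.py | reducer_count_sum_of_each_medals_types
-- ===== SOURCE A (Python) =====
-- def reducer_count_sum_of_each_medals_types(country, medals):
--     total_gold = 0
--     total_silver = 0
--     total_bronze = 0
--     # Total medal counts for each country
--     for medal in medals:
--         total_gold += medal[0]
--         total_silver += medal[1]
--         total_bronze += medal[2]
--     # Yield the country and its total medal counts
--     yield None, (total_gold, total_silver, total_bronze, country)
-- ===== SOURCE B (Python) =====
-- def reducer_count_sum_of_each_medals_types(country, medals):
--     # column-major: transpose once with zip, then reduce each column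
--     cols = list(zip(*medals))
--     if cols:
--         total_gold = sum(cols[0])
--         total_silver = sum(cols[1])
--         total_bronze = sum(cols[2])
--     else:
--         total_gold = total_silver = total_bronze = 0
--     yield None, (total_gold, total_silver, total_bronze, country)
-- ===== Notes on version B (the rewrite author's own statement) =====
-- stated objective: idiomatic
-- what changed: B transposes the rows column-major with zip(*medals) and reduces each column with sum, instead of A's row-by-row loop updating three running accumulators.
import Mathlib
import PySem

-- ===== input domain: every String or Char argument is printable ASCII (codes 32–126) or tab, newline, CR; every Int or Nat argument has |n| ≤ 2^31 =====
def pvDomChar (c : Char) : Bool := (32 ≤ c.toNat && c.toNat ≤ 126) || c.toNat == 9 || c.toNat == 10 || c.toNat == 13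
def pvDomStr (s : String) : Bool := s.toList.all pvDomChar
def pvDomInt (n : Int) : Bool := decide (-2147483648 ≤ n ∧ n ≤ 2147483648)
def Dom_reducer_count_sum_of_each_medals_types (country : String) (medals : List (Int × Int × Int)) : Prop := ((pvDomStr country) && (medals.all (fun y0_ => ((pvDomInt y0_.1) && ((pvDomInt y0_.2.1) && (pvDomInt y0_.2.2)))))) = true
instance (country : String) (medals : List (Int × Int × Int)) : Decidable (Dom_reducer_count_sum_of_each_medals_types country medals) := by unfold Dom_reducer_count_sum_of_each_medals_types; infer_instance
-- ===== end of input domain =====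

-- ===== PORT A =====
-- row-by-row loop: three running sums, then one yield
def reducer_count_sum_of_each_medals_types (country : String) (medals : List (Int × Int × Int)) : List (Option Int × (Int × Int × Int × String)) :=
  let totals := medals.foldl
    (fun (acc : Int × Int × Int) medal =>
      (acc.1 + medal.1, acc.2.1 + medal.2.1, acc.2.2 + medal.2.2))
    (0, 0, 0)
  [(none, (totals.1, totals.2.1, totals.2.2, country))]

-- ===== PORT B =====
-- B: transpose column-major (zip(*medals) = the three projection columns), reduce each column with sum
def reducer_count_sum_of_each_medals_types_alt (country : String) (medals : List (Int × Int × Int)) : List (Option Int × (Int × Int × Int × String)) :=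
  if medals.isEmpty then
    [(none, (0, 0, 0, country))]
  else
    let col0 := medals.map (fun m => m.1)
    let col1 := medals.map (fun m => m.2.1)
    let col2 := medals.map (fun m => m.2.2)
    [(none, (col0.sum, col1.sum, col2.sum, country))]

-- ===== PRECONDITION & SPEC =====
def Spec_reducer_count_sum_of_each_medals_types (country : String) (medals : List (Int × Int × Int)) (out : List (Option Int × (Int × Int × Int × String))) : Prop := out = reducer_count_sum_of_each_medals_types_alt country medals
instance (country : String) (medals : List (Int × Int × Int)) (out : List (Option Int × (Int × Int × Int × String))) : Decidable (Spec_reducer_count_sum_of_each_medals_types country medals out) := by unfold Spec_reducer_count_sum_of_each_medals_types; infer_instance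

-- ===== CLAIM (what is proved, stated in full; the proofs are below) =====
def Claim_equal_reducer_count_sum_of_each_medals_types : Prop := ∀ (country : String) (medals : List (Int × Int × Int)), Dom_reducer_count_sum_of_each_medals_types country medals → Spec_reducer_count_sum_of_each_medals_types country medals (reducer_count_sum_of_each_medals_types country medals)

-- ===== LEMMAS AND PROOFS =====

lemma pv_fold_sums (medals : List (Int × Int × Int)) (a b c : Int) :
    medals.foldl
      (fun (acc : Int × Int × Int) medal =>
        (acc.1 + medal.1, acc.2.1 + medal.2.1, acc.2.2 + medal.2.2))
      (a, b, c)
    = (a + (medals.map (fun m => m.1)).sum,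
       b + (medals.map (fun m => m.2.1)).sum,
       c + (medals.map (fun m => m.2.2)).sum) := by
  induction medals generalizing a b c with
  | nil => simp
  | cons m t ih => simp [List.foldl, ih]; ring_nf; simp

-- ===== VERDICT (by name: the statement is the Claim_ definition above) =====
theorem reducer_count_sum_of_each_medals_types_spec : Claim_equal_reducer_count_sum_of_each_medals_types := by
  intro country medals _
  unfold Spec_reducer_count_sum_of_each_medals_types
  unfold reducer_count_sum_of_each_medals_types reducer_count_sum_of_each_medals_types_alt
  rw [pv_fold_sums]
  cases medals with
  | nil => simp
  | cons m t => simp
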